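-- pv_equiv track=rewrite | github.com/MrBrantCode/unitest_baseline | mut_generate/mist_train_cf/cf_29544/solution.py | longest_common_subsequence_lengths
-- ===== SOURCE A (Python) =====
-- def longest_common_subsequence_lengths(query_nsubsequences, query_subsequences):
--     def longest_common_subsequence_length(s1, s2):
--         m, n = len(s1), len(s2)
--         dp = [[0] * (n + 1) for _ in range(m + 1)]
--         for i in range(1, m + 1):
--             for j in range(1, n + 1):
--                 if s1[i - 1] == s2[j - 1]:
--                     dp[i][j] = dp[i - 1][j - 1] + 1
--                 else:
--                     dp[i][j] = max(dp[i - 1][j], dp[i][j - 1])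
--         return dp[m][n]
--
--     result = []
--     for i in range(query_nsubsequences):
--         sub_seq = query_subsequences[i]
--         max_length = 0
--         for j in range(query_nsubsequences):
--             if i != j:
--                 max_length = max(max_length, longest_common_subsequence_length(sub_seq, query_subsequences[j]))
--         result.append(max_length)
--     return result
-- ===== SOURCE B (Python) =====
-- def longest_common_subsequence_lengths(query_nsubsequences, query_subsequences):
--     def longest_common_subsequence_length(s1, s2):
--         # top-down memoized recursion over prefix index pairs (same function value,
--         # computed demand-driven instead of filling a bottom-up table)
--         memo = {}
--
--         def f(i, j):
--             if i == 0 or j == 0: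
--                 return 0
--             key = (i, j)
--             if key in memo:
--                 return memo[key]
--             if s1[i - 1] == s2[j - 1]:
--                 v = f(i - 1, j - 1) + 1
--             else:
--                 v = max(f(i - 1, j), f(i, j - 1))
--             memo[key] = v
--             return v
--
--         return f(len(s1), len(s2))
--
--     result = []
--     for i in range(query_nsubsequences):
--         sub_seq = query_subsequences[i]
--         max_length = 0
--         for j in range(query_nsubsequences):
--             if i != j:
--                 max_length = max(max_length, longest_common_subsequence_length(sub_seq, query_subsequences[j]))
--         result.append(max_length)
--     return result
-- ===== Notes on version B (the rewrite author's own statement) =====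
-- stated objective: alternative
-- what changed: The inner LCS helper is a top-down memoized recursion f(i,j) over prefix index pairs with an explicit dict cache instead of A's bottom-up fill of a full (m+1)x(n+1) table; the outer all-pairs max loops are unchanged.
import Mathlib
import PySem

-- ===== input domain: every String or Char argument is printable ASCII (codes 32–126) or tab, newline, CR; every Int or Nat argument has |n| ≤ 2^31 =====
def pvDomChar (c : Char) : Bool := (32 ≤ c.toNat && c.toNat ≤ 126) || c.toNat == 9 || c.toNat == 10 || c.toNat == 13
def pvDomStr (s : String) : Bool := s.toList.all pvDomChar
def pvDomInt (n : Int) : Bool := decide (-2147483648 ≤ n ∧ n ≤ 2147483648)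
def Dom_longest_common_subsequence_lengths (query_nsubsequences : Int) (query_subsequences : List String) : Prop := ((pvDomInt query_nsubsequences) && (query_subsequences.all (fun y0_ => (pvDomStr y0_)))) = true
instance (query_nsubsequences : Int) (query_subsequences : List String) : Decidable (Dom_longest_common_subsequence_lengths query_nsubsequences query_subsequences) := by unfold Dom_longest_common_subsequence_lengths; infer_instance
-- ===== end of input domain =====

-- B replaces the inner bottom-up full-table LCS DP by a top-down memoized recursion over
-- index pairs with an explicit dict cache; the outer all-pairs loops are unchanged.

-- ===== PORT A =====
-- dp[i][j] read / write on the nested list (indices always in range in A)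
def pvGet2 (dp : List (List Int)) (i j : Nat) : Int := (dp.getD i []).getD j 0
def pvSet2 (dp : List (List Int)) (i j : Nat) (v : Int) : List (List Int) :=
  dp.set i ((dp.getD i []).set j v)

-- literal port of A's longest_common_subsequence_length: full (m+1)×(n+1) table, filled row by row
def pvLcsA (s1 s2 : List Char) : Int :=
  let m := s1.length
  let n := s2.length
  let dp0 : List (List Int) := List.replicate (m+1) (List.replicate (n+1) (0:Int))
  let dp := (List.range' 1 m).foldl (fun dp i =>
      (List.range' 1 n).foldl (fun dp j =>
        if s1.getD (i-1) 'a' = s2.getD (j-1) 'a'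
        then pvSet2 dp i j (pvGet2 dp (i-1) (j-1) + 1)
        else pvSet2 dp i j (max (pvGet2 dp (i-1) j) (pvGet2 dp i (j-1)))) dp) dp0
  pvGet2 dp m n

def longest_common_subsequence_lengths (query_nsubsequences : Int) (query_subsequences : List String) : List Int :=
  (PySem.List.pyRange 0 query_nsubsequences 1).foldl (fun result i =>
    let sub_seq := PySem.List.pyGetD query_subsequences i ""
    let max_length := (PySem.List.pyRange 0 query_nsubsequences 1).foldl (fun m j =>
      if i ≠ j then max m (pvLcsA sub_seq.toList (PySem.List.pyGetD query_subsequences j "").toList)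
      else m) 0
    result ++ [max_length]) []

-- ===== PORT B =====
-- B's inner helper f(i, j) with its memo dict threaded through (Python's cache mutation
-- becomes state passing; the memo check 'if key in memo: return memo[key]' is the
-- Dict.get? match; the two recursive calls of the else branch run left to right)
def pvFMemo (s1 s2 : List Char) : Nat → Nat → PySem.Dict (Nat × Nat) Int → Int × PySem.Dict (Nat × Nat) Int
  | 0, _, memo => (0, memo)
  | _+1, 0, memo => (0, memo)
  | i+1, j+1, memo =>
    match memo.get? (i+1, j+1) with
    | some v => (v, memo)
    | none =>
      if s1.getD i 'a' = s2.getD j 'a' then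
        let p := pvFMemo s1 s2 i j memo
        (p.1 + 1, p.2.insert (i+1, j+1) (p.1 + 1))
      else
        let p := pvFMemo s1 s2 i (j+1) memo
        let q := pvFMemo s1 s2 (i+1) j p.2
        (max p.1 q.1, q.2.insert (i+1, j+1) (max p.1 q.1))
termination_by i j _ => i + j

-- return f(len(s1), len(s2)) starting from the empty memo
def pvLcsB (s1 s2 : List Char) : Int :=
  (pvFMemo s1 s2 s1.length s2.length PySem.Dict.empty).1

def longest_common_subsequence_lengths_alt (query_nsubsequences : Int) (query_subsequences : List String) : List Int :=
  (PySem.List.pyRange 0 query_nsubsequences 1).foldl (fun result i =>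
    let sub_seq := PySem.List.pyGetD query_subsequences i ""
    let max_length := (PySem.List.pyRange 0 query_nsubsequences 1).foldl (fun m j =>
      if i ≠ j then max m (pvLcsB sub_seq.toList (PySem.List.pyGetD query_subsequences j "").toList)
      else m) 0
    result ++ [max_length]) []

-- ===== PRECONDITION & SPEC =====
-- A indexes query_subsequences[i] for i in range(query_nsubsequences): it raises IndexError
-- when query_nsubsequences exceeds the list length; Pre_ excludes exactly those inputs.
def Pre_longest_common_subsequence_lengths (query_nsubsequences : Int) (query_subsequences : List String) : Prop :=
  query_nsubsequences ≤ (query_subsequences.length : Int)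
instance (query_nsubsequences : Int) (query_subsequences : List String) : Decidable (Pre_longest_common_subsequence_lengths query_nsubsequences query_subsequences) := by unfold Pre_longest_common_subsequence_lengths; infer_instance

def pvWitness_longest_common_subsequence_lengths : Int × List String := (2, ["abca", "bc"])

def Spec_longest_common_subsequence_lengths (query_nsubsequences : Int) (query_subsequences : List String) (out : List Int) : Prop := out = longest_common_subsequence_lengths_alt query_nsubsequences query_subsequences
instance (query_nsubsequences : Int) (query_subsequences : List String) (out : List Int) : Decidable (Spec_longest_common_subsequence_lengths query_nsubsequences query_subsequences out) := by unfold Spec_longest_common_subsequence_lengths; infer_instance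

-- ===== CLAIM (what is proved, stated in full; the proofs are below) =====
def Claim_equal_longest_common_subsequence_lengths : Prop := ∀ (query_nsubsequences : Int) (query_subsequences : List String), Dom_longest_common_subsequence_lengths query_nsubsequences query_subsequences → Pre_longest_common_subsequence_lengths query_nsubsequences query_subsequences → Spec_longest_common_subsequence_lengths query_nsubsequences query_subsequences (longest_common_subsequence_lengths query_nsubsequences query_subsequences)

-- ===== LEMMAS AND PROOFS =====

-- the LCS-prefix function both programs compute: pvLtab s1 s2 i j = LCS length of s1[:i], s2[:j]
def pvLtab (s1 s2 : List Char) : Nat → Nat → Int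
  | 0, _ => 0
  | _+1, 0 => 0
  | i+1, j+1 =>
    if s1.getD i 'a' = s2.getD j 'a'
    then pvLtab s1 s2 i j + 1
    else max (pvLtab s1 s2 i (j+1)) (pvLtab s1 s2 (i+1) j)
termination_by i j => i + j

def pvRowL (s1 s2 : List Char) (i : Nat) : List Int :=
  (List.range (s2.length + 1)).map (fun j => pvLtab s1 s2 i j)

def pvTabL (s1 s2 : List Char) (i : Nat) : List (List Int) :=
  (List.range (s1.length + 1)).map (fun r =>
    if r ≤ i then pvRowL s1 s2 r else List.replicate (s2.length + 1) (0:Int))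

lemma pvLtab_zero (s1 s2 : List Char) (j : Nat) : pvLtab s1 s2 0 j = 0 := by
  cases j <;> simp [pvLtab]

lemma pvLtab_zero' (s1 s2 : List Char) (i : Nat) : pvLtab s1 s2 i 0 = 0 := by
  cases i <;> simp [pvLtab]

lemma getD_map_range' (f : Nat → Int) (n k : Nat) (h : k < n) (d : Int) :
    ((List.range n).map f).getD k d = f k := by
  rw [List.getD_eq_getElem?_getD]
  simp [List.getElem?_map, List.getElem?_range h]

lemma pvRowL_zero (s1 s2 : List Char) :
    pvRowL s1 s2 0 = List.replicate (s2.length + 1) 0 := by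
  unfold pvRowL
  rw [show (fun j => pvLtab s1 s2 0 j) = (fun _ : Nat => (0:Int)) from funext (pvLtab_zero s1 s2)]
  simp [List.map_const']

-- B side: the memoized recursion computes pvLtab and keeps only correct cache entries
def pvMemoOK (s1 s2 : List Char) (memo : PySem.Dict (Nat × Nat) Int) : Prop :=
  ∀ p v, memo.get? p = some v → v = pvLtab s1 s2 p.1 p.2

lemma pvFMemo_correct (s1 s2 : List Char) :
    ∀ N i j memo, i + j ≤ N → pvMemoOK s1 s2 memo →
    (pvFMemo s1 s2 i j memo).1 = pvLtab s1 s2 i j ∧ pvMemoOK s1 s2 (pvFMemo s1 s2 i j memo).2 := by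
  intro N
  induction N with
  | zero =>
    intro i j memo hle hok
    have hi : i = 0 := by omega
    subst hi
    simp [pvFMemo, pvLtab_zero, hok]
  | succ N ih =>
    intro i j memo hle hok
    match i, j with
    | 0, j => simp [pvFMemo, pvLtab_zero, hok]
    | i+1, 0 => simp [pvFMemo, pvLtab_zero', hok]
    | i+1, j+1 =>
      rw [pvFMemo]
      cases hget : memo.get? (i+1, j+1) with
      | some v =>
        refine ⟨?_, by simpa using hok⟩
        simpa using hok _ _ hget
      | none =>
        simp only
        split_ifs with hc
        · obtain ⟨h1, h2⟩ := ih i j memo (by omega) hok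
          constructor
          · simp only [h1]
            rw [pvLtab, if_pos hc]
          · intro p v hv
            rw [PySem.Dict.get?_insert] at hv
            split_ifs at hv with hp
            · subst hp
              simp only [Option.some.injEq] at hv
              rw [← hv, h1, pvLtab, if_pos hc]
            · exact h2 p v hv
        · obtain ⟨h1, h2⟩ := ih i (j+1) memo (by omega) hok
          obtain ⟨h3, h4⟩ := ih (i+1) j _ (by omega) h2
          constructor
          · simp only [h1, h3]
            rw [pvLtab, if_neg hc]
          · intro p v hv
            rw [PySem.Dict.get?_insert] at hv
            split_ifs at hv with hp
            · subst hp
              simp only [Option.some.injEq] at hv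
              rw [← hv, h1, h3, pvLtab, if_neg hc]
            · exact h4 p v hv

lemma pvLcsB_eq (s1 s2 : List Char) : pvLcsB s1 s2 = pvLtab s1 s2 s1.length s2.length := by
  unfold pvLcsB
  exact (pvFMemo_correct s1 s2 (s1.length + s2.length) s1.length s2.length PySem.Dict.empty
    (le_refl _) (by intro p v hv; simp [PySem.Dict.get?_empty] at hv)).1

lemma getD_set_self' (l : List (List Int)) (i : Nat) (v : List Int) (h : i < l.length) :
    (l.set i v).getD i [] = v := by
  simp [List.getD_eq_getElem?_getD, h]

lemma getD_set_ne' (l : List (List Int)) (i j : Nat) (v : List Int) (h : i ≠ j) :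
    (l.set i v).getD j [] = l.getD j [] := by
  simp [List.getD_eq_getElem?_getD, List.getElem?_set_ne h]

lemma set_getD_self' (l : List (List Int)) (i : Nat) (h : i < l.length) :
    l.set i (l.getD i []) = l := by
  rw [List.getD_eq_getElem l [] h]
  exact List.set_getElem_self ..

-- A's inner fold, acting on the whole table, sets row i+1 from row i
lemma pvA_inner (s1 s2 : List Char) (i : Nat) :
    ∀ (cnt k : Nat) (dp : List (List Int)), k + cnt = s2.length →
    i + 1 < dp.length →
    dp.getD i [] = pvRowL s1 s2 i →
    dp.getD (i+1) [] = (List.range (k+1)).map (fun j => pvLtab s1 s2 (i+1) j)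
                        ++ List.replicate (s2.length - k) 0 →
    (List.range' (k+1) cnt).foldl (fun dp j =>
        if s1.getD (i+1-1) 'a' = s2.getD (j-1) 'a'
        then pvSet2 dp (i+1) j (pvGet2 dp (i+1-1) (j-1) + 1)
        else pvSet2 dp (i+1) j (max (pvGet2 dp (i+1-1) j) (pvGet2 dp (i+1) (j-1)))) dp
    = dp.set (i+1) (pvRowL s1 s2 (i+1)) := by
  intro cnt
  induction cnt with
  | zero =>
    intro k dp hk hlen hrow hcur
    have hkn : k = s2.length := by omega
    subst hkn
    simp only [List.range'_zero, List.foldl_nil]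
    have : dp.getD (i+1) [] = pvRowL s1 s2 (i+1) := by
      rw [hcur]; simp [pvRowL]
    rw [← this, set_getD_self' dp (i+1) hlen]
  | succ c ih =>
    intro k dp hk hlen hrow hcur
    have hkn : k < s2.length := by omega
    rw [List.range'_succ, List.foldl_cons]
    have e1 : i + 1 - 1 = i := by omega
    have e2 : k + 1 - 1 = k := by omega
    have g1 : pvGet2 dp i k = pvLtab s1 s2 i k := by
      unfold pvGet2; rw [hrow]; unfold pvRowL
      exact getD_map_range' _ _ _ (by omega) _
    have g2 : pvGet2 dp i (k+1) = pvLtab s1 s2 i (k+1) := by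
      unfold pvGet2; rw [hrow]; unfold pvRowL
      exact getD_map_range' _ _ _ (by omega) _
    have g3 : pvGet2 dp (i+1) k = pvLtab s1 s2 (i+1) k := by
      unfold pvGet2; rw [hcur]
      rw [List.getD_append _ _ _ _ (by simp)]
      exact getD_map_range' _ _ _ (by omega) _
    have hL : pvLtab s1 s2 (i+1) (k+1)
        = if s1.getD i 'a' = s2.getD k 'a' then pvLtab s1 s2 i k + 1
          else max (pvLtab s1 s2 i (k+1)) (pvLtab s1 s2 (i+1) k) := by
      simp [pvLtab]
    have hsetrow : ((dp.getD (i+1) []).set (k+1) (pvLtab s1 s2 (i+1) (k+1)))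
        = (List.range (k+1+1)).map (fun j => pvLtab s1 s2 (i+1) j)
          ++ List.replicate (s2.length - (k+1)) 0 := by
      rw [hcur]
      have hrep : List.replicate (s2.length - k) (0:Int)
          = 0 :: List.replicate (s2.length - (k+1)) 0 := by
        rw [show s2.length - k = (s2.length - (k+1)) + 1 by omega]
        rfl
      rw [hrep]
      rw [show k + 1 = ((List.range (k+1)).map (fun j => pvLtab s1 s2 (i+1) j)).length + 0 by simp]
      rw [List.set_append_right _ _ (by simp)]
      simp only [List.length_map, List.length_range, Nat.add_sub_cancel_left, List.set_cons_zero]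
      rw [show List.range (k+1+1) = List.range (k+1) ++ [k+1] from List.range_succ, List.map_append]
      simp
    have hstep : (if s1.getD (i+1-1) 'a' = s2.getD (k+1-1) 'a'
        then pvSet2 dp (i+1) (k+1) (pvGet2 dp (i+1-1) (k+1-1) + 1)
        else pvSet2 dp (i+1) (k+1) (max (pvGet2 dp (i+1-1) (k+1)) (pvGet2 dp (i+1) (k+1-1))))
        = dp.set (i+1) ((List.range (k+1+1)).map (fun j => pvLtab s1 s2 (i+1) j)
            ++ List.replicate (s2.length - (k+1)) 0) := by
      rw [e1, e2]
      unfold pvSet2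
      rw [← hsetrow, hL]
      split_ifs with h
      · rw [g1]
      · rw [g2, g3]
    rw [hstep]
    rw [ih (k+1) _ (by omega) (by simpa using hlen)
      (by rw [getD_set_ne' _ _ _ _ (by omega)]; exact hrow)
      (getD_set_self' _ _ _ hlen)]
    rw [List.set_set]

lemma getD_map_range2 (g : Nat → List Int) (n k : Nat) (h : k < n) :
    ((List.range n).map g).getD k [] = g k := by
  rw [List.getD_eq_getElem?_getD]
  simp [List.getElem?_map, List.getElem?_range h]

lemma pvTabL_zero (s1 s2 : List Char) :
    pvTabL s1 s2 0 = List.replicate (s1.length + 1) (List.replicate (s2.length + 1) (0:Int)) := by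
  apply List.ext_getElem (by simp [pvTabL])
  intro r h1 h2
  simp only [pvTabL, List.getElem_map, List.getElem_range, List.getElem_replicate]
  split_ifs with hr
  · rw [show r = 0 by omega, pvRowL_zero]
  · rfl

lemma pvTabL_set (s1 s2 : List Char) (k : Nat) :
    (pvTabL s1 s2 k).set (k+1) (pvRowL s1 s2 (k+1)) = pvTabL s1 s2 (k+1) := by
  apply List.ext_getElem (by simp [pvTabL])
  intro r h1 h2
  simp only [pvTabL, List.getElem_set, List.getElem_map, List.getElem_range]
  by_cases h3 : k + 1 = r
  · rw [if_pos h3, if_pos (by omega), ← h3]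
  · rw [if_neg h3]
    by_cases h5 : r ≤ k
    · rw [if_pos h5, if_pos (by omega)]
    · rw [if_neg h5, if_neg (by omega)]

lemma pvA_outer (s1 s2 : List Char) :
    ∀ (cnt k : Nat), k + cnt = s1.length →
    (List.range' (k+1) cnt).foldl (fun dp i =>
      (List.range' 1 s2.length).foldl (fun dp j =>
        if s1.getD (i-1) 'a' = s2.getD (j-1) 'a'
        then pvSet2 dp i j (pvGet2 dp (i-1) (j-1) + 1)
        else pvSet2 dp i j (max (pvGet2 dp (i-1) j) (pvGet2 dp i (j-1)))) dp)
      (pvTabL s1 s2 k)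
    = pvTabL s1 s2 s1.length := by
  intro cnt
  induction cnt with
  | zero =>
    intro k hk
    have : k = s1.length := by omega
    subst this
    rfl
  | succ c ih =>
    intro k hk
    have hkm : k < s1.length := by omega
    rw [List.range'_succ, List.foldl_cons]
    have h1 : (pvTabL s1 s2 k).getD k [] = pvRowL s1 s2 k := by
      unfold pvTabL
      rw [getD_map_range2 _ _ _ (by omega)]
      simp
    have h2 : (pvTabL s1 s2 k).getD (k+1) []
        = (List.range (0+1)).map (fun j => pvLtab s1 s2 (k+1) j)
          ++ List.replicate (s2.length - 0) 0 := by
      unfold pvTabL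
      rw [getD_map_range2 _ _ _ (by omega)]
      rw [if_neg (by omega)]
      simp [pvLtab_zero', List.replicate_succ]
    rw [pvA_inner s1 s2 k s2.length 0 (pvTabL s1 s2 k) (by omega)
      (by simp [pvTabL]; omega) h1 h2]
    rw [pvTabL_set s1 s2 k]
    exact ih (k+1) (by omega)

lemma pvLcsA_eq (s1 s2 : List Char) : pvLcsA s1 s2 = pvLtab s1 s2 s1.length s2.length := by
  show pvGet2 ((List.range' 1 s1.length).foldl (fun dp i =>
      (List.range' 1 s2.length).foldl (fun dp j =>
        if s1.getD (i-1) 'a' = s2.getD (j-1) 'a'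
        then pvSet2 dp i j (pvGet2 dp (i-1) (j-1) + 1)
        else pvSet2 dp i j (max (pvGet2 dp (i-1) j) (pvGet2 dp i (j-1)))) dp)
      (List.replicate (s1.length+1) (List.replicate (s2.length+1) (0:Int))))
      s1.length s2.length = _
  rw [← pvTabL_zero s1 s2]
  have hfold := pvA_outer s1 s2 s1.length 0 (by omega)
  simp only [Nat.zero_add] at hfold
  rw [hfold]
  unfold pvGet2
  have : (pvTabL s1 s2 s1.length).getD s1.length [] = pvRowL s1 s2 s1.length := by
    unfold pvTabL
    rw [getD_map_range2 _ _ _ (by omega)]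
    simp
  rw [this]
  unfold pvRowL
  exact getD_map_range' _ _ _ (by omega) _

lemma pvLcs_eq (s1 s2 : List Char) : pvLcsA s1 s2 = pvLcsB s1 s2 := by
  rw [pvLcsA_eq, pvLcsB_eq]

-- ===== VERDICT (by name: the statement is the Claim_ definition above) =====
theorem longest_common_subsequence_lengths_spec : Claim_equal_longest_common_subsequence_lengths := by
  intro q subs _ _
  unfold Spec_longest_common_subsequence_lengths
  unfold longest_common_subsequence_lengths longest_common_subsequence_lengths_alt
  simp only [pvLcs_eq]
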